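-- pv_equiv track=rewrite | github.com/chiraag7/MINT | LayoutDetector/generateRep.py | getDotNotation
-- ===== SOURCE A (Python) =====
-- def getDotNotation(cellLocations):
--     mini = cellLocations[0][0]
--     minj = cellLocations[0][1]
--     samei = True
--     samej = True
--     previ, prevj = mini, minj
--     for i,j in cellLocations[1:]:
--         if i < mini:
--             mini = i
--         if j < minj:
--             minj = j
--         if prevj != j:
--             samej = False
--         if previ != i:
--             samei = False
--     string = str(mini)
--     if not samei:
--         string += ".."
--     string += ":" + str(minj)
--     if not samej:
--         string += ".."
--     return string
-- ===== SOURCE B (Python) =====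
-- def getDotNotation(cellLocations):
--     si = sorted(i for i, _ in cellLocations)
--     sj = sorted(j for _, j in cellLocations)
--     string = str(si[0])
--     if si[0] != si[-1]:
--         string += ".."
--     string += ":" + str(sj[0])
--     if sj[0] != sj[-1]:
--         string += ".."
--     return string
-- ===== Notes on version B (the rewrite author's own statement) =====
-- stated objective: alternative
-- what changed: Replaces A's single fused loop maintaining six mutable state variables (running mins and compare-to-previous flags) by sorting each coordinate column: the minimum is the sorted head and uniformity is sorted[0]==sorted[-1], so no per-element comparison state is kept at all; this coincides with A because A's previ/prevj are never updated, making its 'same' flags equal to all-elements-equal.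
import Mathlib
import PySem

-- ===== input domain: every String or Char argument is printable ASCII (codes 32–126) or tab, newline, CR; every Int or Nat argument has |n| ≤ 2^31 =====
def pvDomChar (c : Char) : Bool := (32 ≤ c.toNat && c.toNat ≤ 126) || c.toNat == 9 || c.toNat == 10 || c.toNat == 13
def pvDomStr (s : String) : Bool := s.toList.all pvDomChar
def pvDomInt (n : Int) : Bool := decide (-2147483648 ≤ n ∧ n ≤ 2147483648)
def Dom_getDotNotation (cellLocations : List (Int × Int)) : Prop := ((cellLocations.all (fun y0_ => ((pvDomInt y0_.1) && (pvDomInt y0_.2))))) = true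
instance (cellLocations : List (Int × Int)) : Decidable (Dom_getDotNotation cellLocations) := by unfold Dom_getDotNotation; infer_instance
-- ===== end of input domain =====

-- B replaces A's single fused six-variable loop by sorting each coordinate column:
-- the min is the sorted head and uniformity is sorted[0]==sorted[-1] — objective: alternative algorithm.


-- ===== PORT A =====
-- state: (mini, minj, samei, samej, previ, prevj), exactly A's mutable variables
def getDotNotationStep (s : Int × Int × Bool × Bool × Int × Int) (p : Int × Int) :
    Int × Int × Bool × Bool × Int × Int :=
  match s, p with
  | (mini, minj, samei, samej, previ, prevj), (i, j) =>
    let mini := if i < mini then i else mini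
    let minj := if j < minj then j else minj
    let samej := if prevj ≠ j then false else samej
    let samei := if previ ≠ i then false else samei
    (mini, minj, samei, samej, previ, prevj)

def getDotNotation (cellLocations : List (Int × Int)) : String :=
  match cellLocations with
  | [] => ""  -- cellLocations[0] raises IndexError in Python; excluded by Pre_
  | (i0, j0) :: rest =>
    let st := rest.foldl getDotNotationStep (i0, j0, true, true, i0, j0)
    let string := PySem.Int.toStr st.1
    let string := if st.2.2.1 = false then string ++ ".." else string
    let string := string ++ ":" ++ PySem.Int.toStr st.2.1
    let string := if st.2.2.2.1 = false then string ++ ".." else string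
    string

-- ===== PORT B =====
def getDotNotation_alt (cellLocations : List (Int × Int)) : String :=
  match cellLocations with
  | [] => ""  -- si[0] raises IndexError in Python; excluded by Pre_
  | _ :: _ =>
    let si := PySem.List.sorted (cellLocations.map Prod.fst) (fun x => x) false
    let sj := PySem.List.sorted (cellLocations.map Prod.snd) (fun x => x) false
    let string := PySem.Int.toStr (PySem.List.pyGetD si 0 0)
    let string := if PySem.List.pyGetD si 0 0 ≠ PySem.List.pyGetD si (-1) 0 then string ++ ".." else string
    let string := string ++ ":" ++ PySem.Int.toStr (PySem.List.pyGetD sj 0 0)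
    let string := if PySem.List.pyGetD sj 0 0 ≠ PySem.List.pyGetD sj (-1) 0 then string ++ ".." else string
    string

-- ===== PRECONDITION & SPEC =====
-- Pre_ excludes only the empty list, on which A raises IndexError (and B too, on si[0]).
def Pre_getDotNotation (cellLocations : List (Int × Int)) : Prop := cellLocations ≠ []
instance (cellLocations : List (Int × Int)) : Decidable (Pre_getDotNotation cellLocations) := by unfold Pre_getDotNotation; infer_instance
def pvWitness_getDotNotation : (List (Int × Int)) := [(1, 2), (3, 2)]

def Spec_getDotNotation (cellLocations : List (Int × Int)) (out : String) : Prop := out = getDotNotation_alt cellLocations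
instance (cellLocations : List (Int × Int)) (out : String) : Decidable (Spec_getDotNotation cellLocations out) := by unfold Spec_getDotNotation; infer_instance

-- ===== CLAIM =====
def Claim_equal_getDotNotation : Prop := ∀ (cellLocations : List (Int × Int)), Dom_getDotNotation cellLocations → Pre_getDotNotation cellLocations → Spec_getDotNotation cellLocations (getDotNotation cellLocations)

-- ===== LEMMAS AND PROOFS =====

-- A's fold computes: running min of each column, and all-equal-to-(previ,prevj) flags
theorem getDotNotation_fold_eq (rest : List (Int × Int)) (mini minj : Int)
    (samei samej : Bool) (previ prevj : Int) :
    rest.foldl getDotNotationStep (mini, minj, samei, samej, previ, prevj) =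
      ((rest.map Prod.fst).foldl min mini,
       (rest.map Prod.snd).foldl min minj,
       samei && rest.all (fun p => previ == p.1),
       samej && rest.all (fun p => prevj == p.2),
       previ, prevj) := by
  induction rest generalizing mini minj samei samej with
  | nil => simp
  | cons p t ih =>
    obtain ⟨i, j⟩ := p
    simp only [List.foldl_cons, getDotNotationStep, List.map_cons, List.all_cons]
    rw [ih]
    simp only [Prod.mk.injEq]
    and_intros
    · congr 1; simp [min_def]; split_ifs <;> omega
    · congr 1; simp [min_def]; split_ifs <;> omega
    · by_cases h : previ = i <;> simp [h]
    · by_cases h : prevj = j <;> simp [h]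
    · trivial

theorem foldl_min_mem (a : Int) (l : List Int) : l.foldl min a ∈ a :: l := by
  induction l generalizing a with
  | nil => simp
  | cons x t ih =>
    simp only [List.foldl_cons]
    have h := ih (min a x)
    rcases List.mem_cons.mp h with h | h
    · rcases min_choice a x with he | he <;> rw [h, he] <;> simp
    · simp [h]

theorem foldl_min_le (a : Int) (l : List Int) : ∀ y ∈ a :: l, l.foldl min a ≤ y := by
  induction l generalizing a with
  | nil => simp
  | cons x t ih =>
    intro y hy
    simp only [List.foldl_cons]
    have hbase : List.foldl min (min a x) t ≤ min a x := ih (min a x) (min a x) (by simp)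
    rcases List.mem_cons.mp hy with h | h
    · subst h; exact le_trans hbase (min_le_left _ _)
    · rcases List.mem_cons.mp h with h | h
      · subst h; exact le_trans hbase (min_le_right _ _)
      · exact ih (min a x) y (List.mem_cons_of_mem _ h)

-- head of sorted(x0::t) is the left fold of min
theorem sorted_head_eq_foldl_min (x0 : Int) (t : List Int) :
    PySem.List.pyGetD (PySem.List.sorted (x0 :: t) (fun x => x) false) 0 0 = t.foldl min x0 := by
  obtain ⟨m, s, hs⟩ : ∃ m s, PySem.List.sorted (x0 :: t) (fun x => x) false = m :: s := by
    cases h : PySem.List.sorted (x0 :: t) (fun x => x) false with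
    | nil => exact absurd ((PySem.List.sorted_eq_nil_iff _ _ _).mp h) (by simp)
    | cons m s => exact ⟨m, s, rfl⟩
  rw [hs, PySem.List.pyGetD_zero_cons]
  have hperm := PySem.List.sorted_perm (x0 :: t) (fun x => x) false
  rw [hs] at hperm
  have hmem : m ∈ x0 :: t := hperm.mem_iff.mp (List.mem_cons_self)
  have hle : ∀ y ∈ x0 :: t, m ≤ y := PySem.List.key_head_sorted_le (x0 :: t) (fun x => x) hs
  exact le_antisymm (hle _ (foldl_min_mem x0 t)) (foldl_min_le x0 t m hmem)

-- head = last of sorted(x0::t)  ↔  every element of t equals x0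
theorem sorted_head_eq_last_iff (x0 : Int) (t : List Int) :
    (PySem.List.pyGetD (PySem.List.sorted (x0 :: t) (fun x => x) false) 0 0 =
     PySem.List.pyGetD (PySem.List.sorted (x0 :: t) (fun x => x) false) (-1) 0) ↔
    (∀ y ∈ t, y = x0) := by
  obtain ⟨m, r, hs⟩ : ∃ m r, PySem.List.sorted (x0 :: t) (fun x => x) false = m :: r := by
    cases h : PySem.List.sorted (x0 :: t) (fun x => x) false with
    | nil => exact absurd ((PySem.List.sorted_eq_nil_iff _ _ _).mp h) (by simp)
    | cons m r => exact ⟨m, r, rfl⟩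
  rw [hs, PySem.List.pyGetD_zero_cons, PySem.List.pyGetD_neg_one (m :: r) 0 (by simp)]
  have hperm : (m :: r).Perm (x0 :: t) := hs ▸ PySem.List.sorted_perm (x0 :: t) (fun x => x) false
  have hle : ∀ y ∈ x0 :: t, m ≤ y := PySem.List.key_head_sorted_le (x0 :: t) (fun x => x) hs
  have hlast_ge : ∀ y ∈ x0 :: t, y ≤ (m :: r).getLast (by simp) := by
    intro y hy
    have hy' : y ∈ m :: r := hperm.mem_iff.mpr hy
    obtain ⟨k, hk, hky⟩ := List.getElem_of_mem hy'
    have hlen : (m :: r).length - 1 < (PySem.List.sorted (x0 :: t) fun x => x).length := by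
      rw [hs]; simp
    have hmono := PySem.List.sorted_id_getElem_mono (x0 :: t)
      (p := k) (q := (m :: r).length - 1) (by simp at hk ⊢; omega) hlen
    simp only [hs] at hmono
    rw [List.getLast_eq_getElem]
    exact hky ▸ hmono
  have hlast_mem : (m :: r).getLast (by simp) ∈ x0 :: t :=
    hperm.mem_iff.mp (List.getLast_mem _)
  have hm_mem : m ∈ x0 :: t := hperm.mem_iff.mp (by simp)
  constructor
  · intro hml y hy
    have h1 : m ≤ y := hle y (List.mem_cons_of_mem _ hy)
    have h2 : y ≤ (m :: r).getLast (by simp) := hlast_ge y (List.mem_cons_of_mem _ hy)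
    have h3 : m ≤ x0 := hle x0 (by simp)
    have h4 : x0 ≤ (m :: r).getLast (by simp) := hlast_ge x0 (by simp)
    omega
  · intro hall
    have e1 : m = x0 := by
      rcases List.mem_cons.mp hm_mem with h | h
      · exact h
      · exact hall _ h
    have e2 : (m :: r).getLast (by simp) = x0 := by
      rcases List.mem_cons.mp hlast_mem with h | h
      · exact h
      · exact hall _ h
    omega

-- ===== VERDICT =====
theorem getDotNotation_spec : Claim_equal_getDotNotation := by
  unfold Claim_equal_getDotNotation
  intro cl _ hpre
  unfold Spec_getDotNotation getDotNotation getDotNotation_alt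
  match cl with
  | [] => exact absurd rfl hpre
  | (i0, j0) :: rest =>
    simp only [getDotNotation_fold_eq, Bool.true_and, List.map_cons]
    rw [sorted_head_eq_foldl_min i0 (rest.map Prod.fst),
        sorted_head_eq_foldl_min j0 (rest.map Prod.snd)]
    have hi : (rest.all fun p => i0 == p.1) = true ↔ (∀ y ∈ rest.map Prod.fst, y = i0) := by
      simp only [List.all_eq_true, List.mem_map, beq_iff_eq]
      constructor
      · rintro h y ⟨p, hp, rfl⟩; exact (h p hp).symm
      · intro h p hp; exact (h p.1 ⟨p, hp, rfl⟩).symm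
    have hj : (rest.all fun p => j0 == p.2) = true ↔ (∀ y ∈ rest.map Prod.snd, y = j0) := by
      simp only [List.all_eq_true, List.mem_map, beq_iff_eq]
      constructor
      · rintro h y ⟨p, hp, rfl⟩; exact (h p hp).symm
      · intro h p hp; exact (h p.2 ⟨p, hp, rfl⟩).symm
    have Hi : (List.foldl min i0 (rest.map Prod.fst) =
        PySem.List.pyGetD (PySem.List.sorted (i0 :: rest.map Prod.fst) (fun x => x) false) (-1) 0)
        ↔ (rest.all fun p => i0 == p.1) = true := by
      rw [← sorted_head_eq_foldl_min]
      exact (sorted_head_eq_last_iff i0 (rest.map Prod.fst)).trans hi.symm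
    have Hj : (List.foldl min j0 (rest.map Prod.snd) =
        PySem.List.pyGetD (PySem.List.sorted (j0 :: rest.map Prod.snd) (fun x => x) false) (-1) 0)
        ↔ (rest.all fun p => j0 == p.2) = true := by
      rw [← sorted_head_eq_foldl_min]
      exact (sorted_head_eq_last_iff j0 (rest.map Prod.snd)).trans hj.symm
    by_cases h1 : (rest.all fun p => i0 == p.1) = true <;>
      by_cases h2 : (rest.all fun p => j0 == p.2) = true <;>
        simp [Hi, Hj, h1, h2, String.append_assoc]
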